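-- pv_equiv track=rewrite | github.com/NathanKrupa/gaudi | tests/fixtures/smell_mysterious_name.py | calculate_annual_revenue
-- ===== SOURCE A (Python) =====
-- def calculate_annual_revenue(transactions):
--     x = 0
--     d = {}
--     for t in transactions:
--         a = t["amount"]
--         x += a
--         d[t["year"]] = d.get(t["year"], 0) + a
--     return x, d
-- ===== SOURCE B (Python) =====
-- def calculate_annual_revenue(transactions):
--     # Group-by re-implementation: collect the distinct years in first-occurrence
--     # order, then compute each year's revenue with its own filtered sum, and the
--     # grand total as the sum of the per-year subtotals.
--     years = []
--     for t in transactions: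
--         y = t["year"]
--         if y not in years:
--             years.append(y)
--     d = {y: sum(t["amount"] for t in transactions if t["year"] == y) for y in years}
--     return sum(d.values()), d
-- ===== Notes on version B (the rewrite author's own statement) =====
-- stated objective: alternative
-- what changed: Replaces A's single fused accumulation loop with a group-by computation: dedup the years in first-occurrence order, build the per-year dict with one filtered sum per year, and obtain the grand total as the sum of the dict's values instead of accumulating it per transaction.
import Mathlib
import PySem

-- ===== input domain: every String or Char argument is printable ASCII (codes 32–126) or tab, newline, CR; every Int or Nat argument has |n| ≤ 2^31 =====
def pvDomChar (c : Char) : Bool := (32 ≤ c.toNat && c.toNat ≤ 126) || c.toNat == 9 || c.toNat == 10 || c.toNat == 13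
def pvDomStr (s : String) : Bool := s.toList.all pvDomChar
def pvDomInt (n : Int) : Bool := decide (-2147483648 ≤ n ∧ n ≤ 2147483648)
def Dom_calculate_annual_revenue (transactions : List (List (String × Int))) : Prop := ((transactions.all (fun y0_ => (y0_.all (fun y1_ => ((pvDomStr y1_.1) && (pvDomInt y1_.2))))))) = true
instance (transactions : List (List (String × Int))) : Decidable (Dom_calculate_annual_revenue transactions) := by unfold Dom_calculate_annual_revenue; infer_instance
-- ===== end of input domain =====

-- B replaces A's fused accumulation loop with a group-by: dedup the years, one filtered sum per year, grand total = sum of the per-year values; objective: alternative.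


-- t["amount"] / t["year"] as total functions; the default 0 is only reached where
-- Python raises KeyError, which Pre_ excludes.
def pvAmount (t : List (String × Int)) : Int := ((PySem.Dict.mk t).get? "amount").getD 0
def pvYear (t : List (String × Int)) : Int := ((PySem.Dict.mk t).get? "year").getD 0

-- ===== PORT A =====
-- A's fused loop: one pass carrying (x, d); a missing "amount"/"year" key is a
-- KeyError in Python (excluded by Pre_), here the recursion stops with the state so far.
def pvGoA : List (List (String × Int)) → Int → PySem.Dict Int Int → Int × (List (Int × Int))
  | [], x, d => (x, d.items)
  | t :: rest, x, d =>
    match (PySem.Dict.mk t).get? "amount" with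
    | none => (x, d.items)                                -- KeyError (outside Pre_)
    | some a =>
      match (PySem.Dict.mk t).get? "year" with
      | none => (x + a, d.items)                          -- KeyError (outside Pre_)
      | some y => pvGoA rest (x + a) (d.insert y (d.getD y 0 + a))

def calculate_annual_revenue (transactions : List (List (String × Int))) : Int × (List (Int × Int)) :=
  pvGoA transactions 0 PySem.Dict.empty

-- ===== PORT B =====
-- B step 1: the distinct years in first-occurrence order (the 'if y not in years: append' loop).
def pvYearsB (transactions : List (List (String × Int))) : PySem.Set Int :=
  PySem.Set.ofList (transactions.map pvYear)

-- B step 2: sum(t["amount"] for t in transactions if t["year"] == y)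
def pvGroupSumB (transactions : List (List (String × Int))) (y : Int) : Int :=
  ((transactions.filter (fun t => pvYear t == y)).map pvAmount).sum

def calculate_annual_revenue_alt (transactions : List (List (String × Int))) : Int × (List (Int × Int)) :=
  let d := (pvYearsB transactions).foldl
    (fun d y => d.insert y (pvGroupSumB transactions y)) PySem.Dict.empty
  (d.values.sum, d.items)

-- ===== PRECONDITION & SPEC =====
-- Pre_ excludes exactly the inputs where A raises KeyError: a transaction missing "amount" or "year".
def Pre_calculate_annual_revenue (transactions : List (List (String × Int))) : Prop :=
  ∀ t ∈ transactions, ((PySem.Dict.mk t).get? "amount").isSome = true ∧ ((PySem.Dict.mk t).get? "year").isSome = true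
instance (transactions : List (List (String × Int))) : Decidable (Pre_calculate_annual_revenue transactions) := by unfold Pre_calculate_annual_revenue; infer_instance

def pvWitness_calculate_annual_revenue : (List (List (String × Int))) :=
  [[("amount", 3), ("year", 2020)], [("amount", 4), ("year", 2021)], [("amount", -1), ("year", 2020)]]

def Spec_calculate_annual_revenue (transactions : List (List (String × Int))) (out : Int × (List (Int × Int))) : Prop := out = calculate_annual_revenue_alt transactions
instance (transactions : List (List (String × Int))) (out : Int × (List (Int × Int))) : Decidable (Spec_calculate_annual_revenue transactions out) := by unfold Spec_calculate_annual_revenue; infer_instance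

-- ===== CLAIM (what is proved, stated in full; the proofs are below) =====
def Claim_equal_calculate_annual_revenue : Prop := ∀ (transactions : List (List (String × Int))), Dom_calculate_annual_revenue transactions → Pre_calculate_annual_revenue transactions → Spec_calculate_annual_revenue transactions (calculate_annual_revenue transactions)

-- ===== LEMMAS AND PROOFS =====
-- A's fold step, named so all lemmas talk about the same function.
def pvStepA (d : PySem.Dict Int Int) (t : List (String × Int)) : PySem.Dict Int Int :=
  d.insert (pvYear t) (d.getD (pvYear t) 0 + pvAmount t)

-- Under Pre_, A's fused loop is the plain fold of pvStepA, and its x-component is the running sum of amounts.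
theorem pvGoA_eq_foldl (ts : List (List (String × Int))) :
    ∀ (x : Int) (d : PySem.Dict Int Int),
      (∀ t ∈ ts, ((PySem.Dict.mk t).get? "amount").isSome = true ∧ ((PySem.Dict.mk t).get? "year").isSome = true) →
      pvGoA ts x d = (x + (ts.map pvAmount).sum, (ts.foldl pvStepA d).items) := by
  induction ts with
  | nil => intro x d _; simp [pvGoA]
  | cons t rest ih =>
    intro x d h
    obtain ⟨ha, hy⟩ := h t (List.mem_cons_self ..)
    obtain ⟨a, hA⟩ := Option.isSome_iff_exists.mp ha
    obtain ⟨y, hY⟩ := Option.isSome_iff_exists.mp hy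
    have hamt : pvAmount t = a := by simp [pvAmount, hA]
    have hstep : pvStepA d t = d.insert y (d.getD y 0 + a) := by
      simp [pvStepA, pvYear, pvAmount, hA, hY]
    simp only [pvGoA, hA, hY, List.map_cons, List.sum_cons, List.foldl_cons]
    rw [hstep, ih (x + a) _ (fun u hu => h u (List.mem_cons_of_mem _ hu)), hamt,
        ← add_assoc]

-- The value of A's dict at any year: starting value plus that year's group sum.
theorem getD_foldl_stepA (ts : List (List (String × Int))) :
    ∀ (d : PySem.Dict Int Int) (y : Int),
      (ts.foldl pvStepA d).getD y 0 = d.getD y 0 + pvGroupSumB ts y := by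
  induction ts with
  | nil => intro d y; simp [pvGroupSumB]
  | cons t rest ih =>
    intro d y
    simp only [List.foldl_cons, ih, pvGroupSumB, List.filter_cons]
    by_cases hy : pvYear t = y
    · subst hy
      simp [pvStepA, PySem.Dict.getD_insert_self]
      ring
    · have hb : (pvYear t == y) = false := by simp [hy]
      rw [show pvStepA d t = d.insert (pvYear t) (d.getD (pvYear t) 0 + pvAmount t) from rfl,
          PySem.Dict.getD_insert_of_ne _ _ _ (fun e => hy e.symm)]
      simp [hb]

-- Summing an indicator over a nodup list that contains the key yields the value once.
theorem sum_map_indicator (L : List Int) (k : Int) (a : Int)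
    (hnd : L.Nodup) (hk : k ∈ L) :
    (L.map (fun y => if y = k then a else 0)).sum = a := by
  induction L with
  | nil => cases hk
  | cons z rest ih =>
    rcases List.mem_cons.mp hk with h | h
    · have hzn : z ∉ rest := (List.nodup_cons.mp hnd).1
      have hz : (rest.map (fun y => if y = k then a else 0)).sum = 0 := by
        apply List.sum_eq_zero
        intro w hw
        obtain ⟨u, hu, rfl⟩ := List.mem_map.mp hw
        have : u ≠ k := fun e => hzn ((e.trans h) ▸ hu)
        simp [this]
      simp [← h, hz]
    · have hnz : z ≠ k := by
        rintro rfl; exact (List.nodup_cons.mp hnd).1 h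
      simp [hnz, ih (List.nodup_cons.mp hnd).2 h]

-- Partition: summing the per-year group sums over any nodup list covering all years
-- gives the sum of all amounts.
theorem sum_groupSums (ts : List (List (String × Int))) :
    ∀ (L : List Int), L.Nodup → (∀ t ∈ ts, pvYear t ∈ L) →
      (L.map (fun y => pvGroupSumB ts y)).sum = (ts.map pvAmount).sum := by
  induction ts with
  | nil => intro L _ _; simp [pvGroupSumB]
  | cons t rest ih =>
    intro L hnd hcov
    have step : ∀ y, pvGroupSumB (t :: rest) y =
        (if y = pvYear t then pvAmount t else 0) + pvGroupSumB rest y := by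
      intro y
      simp only [pvGroupSumB, List.filter_cons]
      by_cases h : pvYear t = y
      · simp [h]
      · have hb : (pvYear t == y) = false := by simp [h]
        simp [hb, show y ≠ pvYear t from fun e => h e.symm]
    calc (L.map (fun y => pvGroupSumB (t :: rest) y)).sum
        = (L.map (fun y => (if y = pvYear t then pvAmount t else 0) + pvGroupSumB rest y)).sum := by
          simp only [step]
      _ = (L.map (fun y => if y = pvYear t then pvAmount t else 0)).sum
            + (L.map (fun y => pvGroupSumB rest y)).sum := by
          rw [← List.sum_map_add]
      _ = pvAmount t + (rest.map pvAmount).sum := by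
          rw [sum_map_indicator L (pvYear t) (pvAmount t) hnd
                (hcov t (List.mem_cons_self ..)),
              ih L hnd (fun u hu => hcov u (List.mem_cons_of_mem _ hu))]
      _ = ((t :: rest).map pvAmount).sum := by simp

-- B's group-by dict build, as items: one appended pair per distinct year.
theorem itemsB_eq (ts : List (List (String × Int))) :
    (List.foldl (fun d y => d.insert y (pvGroupSumB ts y)) PySem.Dict.empty (pvYearsB ts)).items
      = (pvYearsB ts).map (fun y => (y, pvGroupSumB ts y)) := by
  have hnd : (List.map (fun y => y) (pvYearsB ts)).Nodup := by
    simp only [List.map_id']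
    exact PySem.Set.nodup_ofList _
  have h := PySem.Dict.items_foldl_insert_fresh (pvYearsB ts) (fun y => y)
      (fun y => pvGroupSumB ts y) PySem.Dict.empty
      (fun a _ => PySem.Dict.contains_empty _) hnd
  simpa using h

-- A's dict (as items) equals B's group-by dict (as items).
theorem itemsA_eq_itemsB (ts : List (List (String × Int))) :
    (ts.foldl pvStepA PySem.Dict.empty).items
      = (List.foldl (fun d y => d.insert y (pvGroupSumB ts y)) PySem.Dict.empty (pvYearsB ts)).items := by
  have hkeys : (ts.foldl pvStepA PySem.Dict.empty).keys = pvYearsB ts := by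
    rw [show pvStepA = (fun d t => d.insert (pvYear t) (d.getD (pvYear t) 0 + pvAmount t)) from rfl,
        PySem.Dict.keys_foldl_insert_key]
    simp [PySem.Dict.keys_empty, PySem.Set.update_nil_left, pvYearsB]
  have hndA : (ts.foldl pvStepA PySem.Dict.empty).keys.Nodup := by
    rw [hkeys]; exact PySem.Set.nodup_ofList _
  rw [PySem.Dict.items_eq_map_keys _ hndA 0, hkeys, itemsB_eq]
  apply List.map_congr_left
  intro y _
  rw [getD_foldl_stepA, PySem.Dict.getD_empty]
  simp

-- ===== VERDICT (by name: the statement is the Claim_ definition above) =====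
theorem calculate_annual_revenue_spec : Claim_equal_calculate_annual_revenue := by
  intro ts _ hpre
  unfold Spec_calculate_annual_revenue calculate_annual_revenue calculate_annual_revenue_alt
  rw [pvGoA_eq_foldl ts 0 PySem.Dict.empty hpre]
  have hcov : ∀ t ∈ ts, pvYear t ∈ pvYearsB ts := by
    intro t ht
    exact (PySem.Set.mem_ofList ..).mpr (List.mem_map_of_mem ht)
  have hvals : (List.foldl (fun d y => d.insert y (pvGroupSumB ts y)) PySem.Dict.empty (pvYearsB ts)).values.sum
      = (ts.map pvAmount).sum := by
    rw [show (List.foldl (fun d y => d.insert y (pvGroupSumB ts y)) PySem.Dict.empty (pvYearsB ts)).values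
          = (List.foldl (fun d y => d.insert y (pvGroupSumB ts y)) PySem.Dict.empty (pvYearsB ts)).items.map (·.2) from rfl,
        itemsB_eq]
    rw [List.map_map]
    exact sum_groupSums ts (pvYearsB ts) (PySem.Set.nodup_ofList _) hcov
  rw [Prod.ext_iff]
  exact ⟨by simpa using hvals.symm, itemsA_eq_itemsB ts⟩
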